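-- pv_equiv track=rewrite | github.com/DansiDanutz/ZmartBot | zmart-api/service_requirements_audit.py | check_cert_sequential_integrity
-- ===== SOURCE A (Python) =====
-- from typing import Dict, List, Optional, Set
--
-- def check_cert_sequential_integrity(cert_services: List[Dict]) -> bool:
--     """Check if CERT IDs are sequential"""
--     if not cert_services:
--         return True
--
--     cert_numbers = []
--     for service in cert_services:
--         cert_id = service.get('cert_id', '')
--         if cert_id.startswith('CERT'):
--             try:
--                 number = int(cert_id[4:])  # Remove 'CERT' prefix
--                 cert_numbers.append(number)
--             except ValueError:
--                 return False
--
--     cert_numbers.sort()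
--     expected = list(range(1, len(cert_numbers) + 1))
--     return cert_numbers == expected
-- ===== SOURCE B (Python) =====
-- def check_cert_sequential_integrity(cert_services):
--     """One pass: collect parsed numbers in a set, track min/max and count;
--     sequential 1..n iff all distinct, min == 1 and max == count."""
--     seen = set()
--     count = 0
--     mn = None
--     mx = None
--     for service in cert_services:
--         cert_id = service.get('cert_id', '')
--         if cert_id.startswith('CERT'):
--             try:
--                 number = int(cert_id[4:])
--             except ValueError:
--                 return False
--             seen.add(number)
--             count += 1
--             if mn is None or number < mn:
--                 mn = number
--             if mx is None or number > mx:
--                 mx = number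
--     if count == 0:
--         return True
--     return len(seen) == count and mn == 1 and mx == count
-- ===== Notes on version B (the rewrite author's own statement) =====
-- stated objective: alternative
-- what changed: Replaces A's collect-then-sort-and-compare-to-range(1,n+1) by a single pass that keeps a set of seen numbers plus a running min, max and count, and checks distinctness, min==1 and max==count at the end.
import Mathlib
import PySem

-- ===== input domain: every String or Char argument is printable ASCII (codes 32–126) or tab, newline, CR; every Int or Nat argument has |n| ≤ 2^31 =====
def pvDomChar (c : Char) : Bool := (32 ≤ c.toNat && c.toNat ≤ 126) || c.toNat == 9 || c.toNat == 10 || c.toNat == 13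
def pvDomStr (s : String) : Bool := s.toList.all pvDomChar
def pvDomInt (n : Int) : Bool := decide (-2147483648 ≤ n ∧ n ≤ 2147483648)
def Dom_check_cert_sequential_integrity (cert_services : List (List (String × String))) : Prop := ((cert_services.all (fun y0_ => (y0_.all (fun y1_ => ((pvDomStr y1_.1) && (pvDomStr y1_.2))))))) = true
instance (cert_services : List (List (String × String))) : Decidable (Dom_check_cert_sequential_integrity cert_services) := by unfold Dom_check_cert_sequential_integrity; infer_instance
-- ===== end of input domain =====

-- ===== PORT A =====
-- B replaces A's sort-and-compare-to-range by a single pass keeping a set of seen numbers plus running min/max/count (alternative decomposition; not measured faster).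
-- A's loop: collect parsed CERT numbers, early exit (none) on a ValueError of int().
def pvALoop (services : List (List (String × String))) (acc : List Int) : Option (List Int) :=
  match services with
  | [] => some acc
  | s :: rest =>
    let cert_id := (PySem.Dict.ofList s).getD "cert_id" ""
    if PySem.Str.startswith cert_id "CERT" then
      match PySem.Int.ofStr? (PySem.Str.slice cert_id (some 4) none) with
      | some number => pvALoop rest (acc ++ [number])
      | none => none
    else pvALoop rest acc

def check_cert_sequential_integrity (cert_services : List (List (String × String))) : Bool :=
  if cert_services = [] then true
  else
    match pvALoop cert_services [] with
    | none => false
    | some cert_numbers =>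
      let sorted := PySem.List.sorted cert_numbers (fun x => x) false
      let expected := PySem.List.pyRange 1 ((cert_numbers.length : Int) + 1) 1
      decide (sorted = expected)

-- ===== PORT B =====
-- B's loop: one pass keeping (seen set, count, running min, running max); none = the ValueError early return.
def pvBLoop (services : List (List (String × String))) (seen : PySem.Set Int)
    (count : Int) (mn mx : Option Int) :
    Option (PySem.Set Int × Int × Option Int × Option Int) :=
  match services with
  | [] => some (seen, count, mn, mx)
  | s :: rest =>
    let cert_id := (PySem.Dict.ofList s).getD "cert_id" ""
    if PySem.Str.startswith cert_id "CERT" then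
      match PySem.Int.ofStr? (PySem.Str.slice cert_id (some 4) none) with
      | some number =>
        let seen := PySem.Set.add seen number
        let count := count + 1
        let mn := match mn with
          | none => some number
          | some m => if number < m then some number else some m
        let mx := match mx with
          | none => some number
          | some m => if number > m then some number else some m
        pvBLoop rest seen count mn mx
      | none => none
    else pvBLoop rest seen count mn mx

def check_cert_sequential_integrity_alt (cert_services : List (List (String × String))) : Bool :=
  match pvBLoop cert_services PySem.Set.empty 0 none none with
  | none => false
  | some (seen, count, mn, mx) =>
    if count = 0 then true
    else decide (PySem.Set.len seen = count) && decide (mn = some 1) && decide (mx = some count)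


-- ===== PRECONDITION & SPEC =====
def Spec_check_cert_sequential_integrity (cert_services : List (List (String × String))) (out : Bool) : Prop := out = check_cert_sequential_integrity_alt cert_services
instance (cert_services : List (List (String × String))) (out : Bool) : Decidable (Spec_check_cert_sequential_integrity cert_services out) := by unfold Spec_check_cert_sequential_integrity; infer_instance

-- ===== CLAIM (what is proved, stated in full; the proofs are below) =====
def Claim_equal_check_cert_sequential_integrity : Prop := ∀ (cert_services : List (List (String × String))), Dom_check_cert_sequential_integrity cert_services → Spec_check_cert_sequential_integrity cert_services (check_cert_sequential_integrity cert_services)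

-- ===== LEMMAS AND PROOFS =====

-- proof-only helpers: the running-min/max steps of B's loop, as named functions
def pvStepMin (mn : Option Int) (n : Int) : Option Int :=
  match mn with | none => some n | some m => if n < m then some n else some m

def pvStepMax (mx : Option Int) (n : Int) : Option Int :=
  match mx with | none => some n | some m => if n > m then some n else some m

def pvMin (l : List Int) : Option Int := l.foldl pvStepMin none
def pvMax (l : List Int) : Option Int := l.foldl pvStepMax none

theorem pvFoldl_stepMin (t : List Int) (m : Int) :
    t.foldl pvStepMin (some m) = some (t.foldl min m) := by
  induction t generalizing m with
  | nil => rfl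
  | cons x t ih =>
    have h : pvStepMin (some m) x = some (min m x) := by
      simp only [pvStepMin, min_def]
      split_ifs <;> first | rfl | (exact congrArg some (by omega))
    rw [List.foldl_cons, h, ih, List.foldl_cons]
theorem pvFoldl_stepMax (t : List Int) (m : Int) :
    t.foldl pvStepMax (some m) = some (t.foldl max m) := by
  induction t generalizing m with
  | nil => rfl
  | cons x t ih =>
    have h : pvStepMax (some m) x = some (max m x) := by
      simp only [pvStepMax, max_def]
      split_ifs <;> first | rfl | (exact congrArg some (by omega))
    rw [List.foldl_cons, h, ih, List.foldl_cons]
theorem pvMin_eq_min? (l : List Int) : pvMin l = PySem.List.min? l (fun y => y) := by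
  cases l with
  | nil => rfl
  | cons x t =>
    rw [pvMin, List.foldl_cons, PySem.List.min?_id_cons]
    exact pvFoldl_stepMin t x
theorem pvMax_eq_max? (l : List Int) : pvMax l = PySem.List.max? l (fun y => y) := by
  cases l with
  | nil => rfl
  | cons x t =>
    rw [pvMax, List.foldl_cons, PySem.List.max?_id_cons]
    exact pvFoldl_stepMax t x
theorem pvNodup_of_len (xs : List Int) (h : (PySem.Set.ofList xs).length = xs.length) :
    xs.Nodup := by
  have hn := PySem.Set.nodup_ofList xs
  have hsub : (PySem.Set.ofList xs) ⊆ xs := fun x hx => (PySem.Set.mem_ofList xs x).mp hx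
  have hp := (List.subperm_of_subset hn hsub).perm_of_length_le (le_of_eq h.symm)
  exact hp.nodup hn

theorem pvKeyIff (nums : List Int) (h0 : nums ≠ []) :
    (PySem.List.sorted nums (fun x => x) false
        = PySem.List.pyRange 1 ((nums.length : Int) + 1) 1)
      ↔ (((PySem.Set.ofList nums).length : Int) = (nums.length : Int)
         ∧ pvMin nums = some 1 ∧ pvMax nums = some (nums.length : Int)) := by
  have hlenR : (PySem.List.pyRange 1 ((nums.length : Int) + 1) 1).length = nums.length := by
    rw [PySem.List.length_pyRange_one]; omega
  have hn1 : (1 : Int) ≤ (nums.length : Int) := by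
    have : nums.length ≠ 0 := fun hc => h0 (List.length_eq_zero_iff.mp hc)
    omega
  constructor
  · intro h
    have hperm : (PySem.List.pyRange 1 ((nums.length : Int) + 1) 1).Perm nums := by
      rw [← h]; exact PySem.List.sorted_perm nums (fun x => x) false
    have hnd : nums.Nodup := hperm.nodup (PySem.List.nodup_pyRange_one _ _)
    refine ⟨by rw [PySem.Set.ofList_eq_self_of_nodup nums hnd], ?_, ?_⟩
    · rw [pvMin_eq_min?]
      obtain ⟨m, hm⟩ : ∃ m, PySem.List.min? nums (fun y : Int => y) = some m := by
        cases hcm : PySem.List.min? nums (fun y : Int => y) with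
        | none => exact absurd ((PySem.List.min?_eq_none_iff _ _).mp hcm) h0
        | some m => exact ⟨m, rfl⟩
      have hmem := PySem.List.min?_mem hm
      have hmR := (hperm.mem_iff).mpr hmem
      have h1m : 1 ≤ m := ((PySem.List.mem_pyRange_one).mp hmR).1
      have h1nums : (1 : Int) ∈ nums :=
        hperm.subset ((PySem.List.mem_pyRange_one).mpr ⟨le_refl 1, by omega⟩)
      have hm1 : m ≤ 1 := PySem.List.min?_isMin hm 1 h1nums
      rw [hm]; congr 1; omega
    · rw [pvMax_eq_max?]
      obtain ⟨m, hm⟩ : ∃ m, PySem.List.max? nums (fun y : Int => y) = some m := by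
        cases hcm : PySem.List.max? nums (fun y : Int => y) with
        | none => exact absurd ((PySem.List.max?_eq_none_iff _ _).mp hcm) h0
        | some m => exact ⟨m, rfl⟩
      have hmem := PySem.List.max?_mem hm
      have hmR := (hperm.mem_iff).mpr hmem
      have hmn : m ≤ (nums.length : Int) := by
        have := ((PySem.List.mem_pyRange_one).mp hmR).2; omega
      have hnnums : ((nums.length : Int)) ∈ nums :=
        hperm.subset ((PySem.List.mem_pyRange_one).mpr ⟨hn1, by omega⟩)
      have hnm : (nums.length : Int) ≤ m := PySem.List.max?_isMax hm _ hnnums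
      rw [hm]; congr 1; omega
  · rintro ⟨hlen, hmn, hmx⟩
    rw [pvMin_eq_min?] at hmn
    rw [pvMax_eq_max?] at hmx
    have hnd : nums.Nodup := pvNodup_of_len nums (by exact_mod_cast hlen)
    have hsub : nums ⊆ PySem.List.pyRange 1 ((nums.length : Int) + 1) 1 := by
      intro x hx
      have h1 : 1 ≤ x := PySem.List.min?_isMin hmn x hx
      have h2 : x ≤ (nums.length : Int) := PySem.List.max?_isMax hmx x hx
      exact (PySem.List.mem_pyRange_one).mpr ⟨h1, by omega⟩
    have hperm : nums.Perm (PySem.List.pyRange 1 ((nums.length : Int) + 1) 1) :=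
      (List.subperm_of_subset hnd hsub).perm_of_length_le (le_of_eq hlenR)
    exact PySem.List.sorted_eq_of_perm_of_pairwise_lt _ _ _ hperm.symm
      (PySem.List.pairwise_lt_pyRange_one _ _)


-- B's loop state over the services consumed so far is determined by A's accumulator
theorem pvLoop_rel (services : List (List (String × String))) : ∀ acc : List Int,
    pvBLoop services (PySem.Set.ofList acc) (acc.length : Int) (pvMin acc) (pvMax acc)
      = (pvALoop services acc).map
          (fun l => (PySem.Set.ofList l, (l.length : Int), pvMin l, pvMax l)) := by
  induction services with
  | nil => intro acc; rfl
  | cons s rest ih =>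
    intro acc
    rw [pvALoop, pvBLoop]
    by_cases hsw : PySem.Str.startswith ((PySem.Dict.ofList s).getD "cert_id" "") "CERT" = true
    case neg =>
      rw [if_neg hsw, if_neg hsw]
      exact ih acc
    case pos =>
      rw [if_pos hsw, if_pos hsw]
      cases PySem.Int.ofStr? (PySem.Str.slice ((PySem.Dict.ofList s).getD "cert_id" "") (some 4) none) with
      | none => rfl
      | some n =>
        have hset : PySem.Set.add (PySem.Set.ofList acc) n = PySem.Set.ofList (acc ++ [n]) := by
          rw [PySem.Set.ofList_eq_foldl, PySem.Set.ofList_eq_foldl, List.foldl_append]; rfl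
        have hmin : pvStepMin (pvMin acc) n = pvMin (acc ++ [n]) := by
          rw [pvMin, pvMin, List.foldl_append]; rfl
        have hmax : pvStepMax (pvMax acc) n = pvMax (acc ++ [n]) := by
          rw [pvMax, pvMax, List.foldl_append]; rfl
        have hlen : (acc.length : Int) + 1 = ((acc ++ [n]).length : Int) := by simp
        show pvBLoop rest (PySem.Set.add (PySem.Set.ofList acc) n) ((acc.length : Int) + 1)
          (pvStepMin (pvMin acc) n) (pvStepMax (pvMax acc) n) = _
        rw [hset, hmin, hmax, hlen]
        exact ih (acc ++ [n])

-- the core fact, as a Bool equation matching both ports' final expressions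
theorem pvKey (nums : List Int) :
    decide (PySem.List.sorted nums (fun x => x) false
              = PySem.List.pyRange 1 ((nums.length : Int) + 1) 1)
      = (if ((nums.length : Int) = 0) then true
         else decide (PySem.Set.len (PySem.Set.ofList nums) = (nums.length : Int))
              && decide (pvMin nums = some 1)
              && decide (pvMax nums = some (nums.length : Int))) := by
  by_cases h0 : nums = []
  · subst h0; rfl
  · have hne : ¬ ((nums.length : Int) = 0) := by
      intro hc
      exact h0 (List.length_eq_zero_iff.mp (by exact_mod_cast hc))
    rw [if_neg hne, ← Bool.decide_and, ← Bool.decide_and, decide_eq_decide]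
    have hlen : PySem.Set.len (PySem.Set.ofList nums)
        = ((PySem.Set.ofList nums).length : Int) := rfl
    rw [hlen, and_assoc]
    exact pvKeyIff nums h0

-- ===== VERDICT (by name: the statement is the Claim_ definition above) =====
theorem check_cert_sequential_integrity_spec : Claim_equal_check_cert_sequential_integrity := by
  unfold Claim_equal_check_cert_sequential_integrity Spec_check_cert_sequential_integrity
  intro cs _
  have hB : pvBLoop cs PySem.Set.empty 0 none none
      = (pvALoop cs []).map
          (fun l => (PySem.Set.ofList l, (l.length : Int), pvMin l, pvMax l)) :=
    pvLoop_rel cs []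
  rw [check_cert_sequential_integrity_alt, check_cert_sequential_integrity, hB]
  cases hA : pvALoop cs [] with
  | none =>
    have hcs : cs ≠ [] := by
      intro h
      rw [h] at hA
      have h0 : (some ([] : List Int) : Option (List Int)) = none := hA
      simp at h0
    rw [if_neg hcs]
    rfl
  | some nums =>
    by_cases hcs : cs = []
    · subst hcs
      have hnums : nums = [] := by
        have h0 : some ([] : List Int) = some nums := hA
        exact ((Option.some.injEq _ _).mp h0).symm
      subst hnums
      rfl
    · rw [if_neg hcs]
      show decide _ = _
      exact pvKey nums
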